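-- pv_equiv track=rewrite | github.com/Dend0x/MUNI_FI | ib111/05/05/v1_bugs.py | light_bugs
-- ===== SOURCE A (Python) =====
-- def is_light(start, i, was_ligthed):
--     if start[i] > 3 and i not in was_ligthed:
--         was_ligthed.add(i)
--         start[i] = 0
--         if i - 1 >= 0:
--             if i - 1 not in was_ligthed:
--                 start[i - 1] += 1
--                 is_light(start, i - 1, was_ligthed)
--         if i + 1 < len(start):
--             if i + 1 not in was_ligthed:
--                 start[i + 1] += 1
--                 is_light(start, i + 1, was_ligthed)
--
-- def light_bugs(start, time):
--     result = [start.copy()]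
--
--     for j in range(time - 1):
--         was_lighted = set()
--         aux = result[j].copy()
--         i = 0
--         while i < len(aux):
--             if i not in was_lighted:
--                 aux[i] += 1
--             is_light(aux, i, was_lighted)
--             i += 1
--         result.append(aux)
--
--     return result
-- ===== SOURCE B (Python) =====
-- def light_bugs(start, time):
--     # Iterative cascade: the recursive is_light is replaced by an explicit
--     # stack of phased frames (index, phase); phase 'right' defers a fired
--     # cell's right-neighbour check until its left subtree has completed.
--     cur = start.copy()
--     result = [cur]
--     for _ in range(time - 1):
--         aux = cur.copy()
--         was = set()
--         for i in range(len(aux)):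
--             if i not in was:
--                 aux[i] += 1
--             stack = [(i, True)]          # True = 'call', False = 'right'
--             while stack:
--                 j, call = stack.pop()
--                 if call:
--                     if 0 <= j < len(aux) and aux[j] > 3 and j not in was:
--                         was.add(j)
--                         aux[j] = 0
--                         stack.append((j, False))
--                         if j - 1 >= 0 and j - 1 not in was:
--                             aux[j - 1] += 1
--                             stack.append((j - 1, True))
--                 else:
--                     if j + 1 < len(aux) and j + 1 not in was:
--                         aux[j + 1] += 1
--                         stack.append((j + 1, True))
--         result.append(aux)
--         cur = aux
--     return result
-- ===== Notes on version B (the rewrite author's own statement) =====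
-- stated objective: alternative
-- what changed: The recursive is_light cascade is replaced by an iterative explicit stack of phased (index, call/right) frames that defers each fired cell's right-neighbour check until its left subtree completes, and the per-step snapshot is threaded through a 'cur' accumulator instead of re-indexing result[j].
import Mathlib
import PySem

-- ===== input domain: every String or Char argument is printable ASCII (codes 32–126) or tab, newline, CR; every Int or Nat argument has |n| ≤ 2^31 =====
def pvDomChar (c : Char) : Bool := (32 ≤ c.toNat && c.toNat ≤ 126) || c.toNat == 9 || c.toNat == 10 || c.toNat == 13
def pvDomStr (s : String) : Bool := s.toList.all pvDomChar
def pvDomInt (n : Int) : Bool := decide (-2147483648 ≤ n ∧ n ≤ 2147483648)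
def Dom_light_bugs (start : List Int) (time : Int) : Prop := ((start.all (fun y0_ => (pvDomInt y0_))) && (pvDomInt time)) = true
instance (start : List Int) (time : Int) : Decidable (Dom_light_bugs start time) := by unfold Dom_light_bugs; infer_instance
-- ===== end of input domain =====

-- B replaces A's recursive is_light cascade by an explicit stack of phased (index, call/right)
-- frames and threads the previous snapshot through an accumulator instead of re-indexing result[j]
-- (objective: alternative decomposition, same cost; neither program mutates its arguments).

-- shared helper: aux[j] += 1  (call sites always have 0 ≤ j < len, so the total forms are exact)
def pvInc (aux : List Int) (j : Int) : List Int :=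
  PySem.List.pySetD aux j (PySem.List.pyGetD aux j 0 + 1)

-- ===== PORT A =====
-- is_light: fuel is only a totalizing guard; every call site passes aux.length + 1, which is
-- proved sufficient below (call depth is bounded by the number of not-yet-lighted cells).
-- State: (start, was_ligthed) with was_ligthed a PySem.Set Int.
def isLightA (fuel : Nat) (aux : List Int) (was : PySem.Set Int) (i : Int) : List Int × PySem.Set Int :=
  match fuel with
  | 0 => (aux, was)
  | f + 1 =>
    -- start[i] > 3: i is in range at every call site, so the total pyGetD is exact
    if 3 < PySem.List.pyGetD aux i 0 ∧ i ∉ was then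
      let was1 := PySem.Set.add was i
      let aux1 := PySem.List.pySetD aux i 0
      let st2 :=
        if 0 ≤ i - 1 ∧ (i - 1) ∉ was1 then
          isLightA f (pvInc aux1 (i - 1)) was1 (i - 1)
        else (aux1, was1)
      if i + 1 < (st2.1.length : Int) ∧ (i + 1) ∉ st2.2 then
        isLightA f (pvInc st2.1 (i + 1)) st2.2 (i + 1)
      else st2
    else (aux, was)

-- light_bugs: the while loop runs i = 0 .. len(aux)-1 (len(aux) never changes), ported as a
-- foldl over List.range; result[j] is always in range in A, ported with the total pyGetD.
def light_bugs (start : List Int) (time : Int) : List (List Int) :=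
  (PySem.List.pyRange 0 (time - 1) 1).foldl
    (fun result j =>
      let aux0 := PySem.List.pyGetD result j []
      let p := (List.range aux0.length).foldl
        (fun (st : List Int × PySem.Set Int) (i : Nat) =>
          let aux := if (i : Int) ∉ st.2 then pvInc st.1 (i : Int) else st.1
          isLightA (aux.length + 1) aux st.2 (i : Int))
        (aux0, PySem.Set.empty)
      result ++ [p.1])
    [start]

-- ===== PORT B =====
-- number of indices 0..n-1 not yet in the lighted set (termination measure of the stack machine)
def pvUnlit (n : Nat) (was : List Int) : Nat :=
  (List.range n).countP (fun k => decide ((Int.ofNat k) ∉ was))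

theorem pvUnlit_succ (n : Nat) (was : List Int) :
    pvUnlit (n+1) was = pvUnlit n was + (if (Int.ofNat n) ∈ was then 0 else 1) := by
  simp [pvUnlit, List.range_succ, List.countP_append, List.countP_cons]

theorem pvUnlit_add_le (n : Nat) (was : PySem.Set Int) (j : Int) :
    pvUnlit n (PySem.Set.add was j) ≤ pvUnlit n was := by
  apply List.countP_mono_left
  intro k _ h
  simp_all [PySem.Set.mem_add]

theorem pvUnlit_add_lt (n : Nat) (was : PySem.Set Int) (j : Int)
    (h0 : 0 ≤ j) (h1 : j < (n : Int)) (h2 : j ∉ was) :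
    pvUnlit n (PySem.Set.add was j) < pvUnlit n was := by
  induction n with
  | zero => omega
  | succ n ih =>
    rw [pvUnlit_succ, pvUnlit_succ]
    by_cases hj : j < (n : Int)
    · have h := ih hj
      have hle : (if (Int.ofNat n) ∈ PySem.Set.add was j then (0:Nat) else 1) ≤
          (if (Int.ofNat n) ∈ was then (0:Nat) else 1) := by
        simp [PySem.Set.mem_add]
        split <;> split <;> simp_all
      omega
    · have hjn : j = (n : Int) := by omega
      subst hjn
      have c1 : (Int.ofNat n) ∈ PySem.Set.add was (Int.ofNat n) := by
        simp [PySem.Set.mem_add]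
      have c2 : (Int.ofNat n) ∉ was := by simp_all
      have := pvUnlit_add_le n was (Int.ofNat n)
      simp_all

theorem pvInc_length (aux : List Int) (j : Int) : (pvInc aux j).length = aux.length := by
  simp [pvInc, PySem.List.length_pySetD]

-- stack machine for the cascade: frames (j, true) = pending call, (j, false) = deferred
-- right-neighbour check of a fired cell j
def runStackB (aux : List Int) (was : PySem.Set Int) (stack : List (Int × Bool)) :
    List Int × PySem.Set Int :=
  match stack with
  | [] => (aux, was)
  | (j, call) :: rest =>
    if call then
      if hg : 0 ≤ j ∧ j < (aux.length : Int) ∧ 3 < PySem.List.pyGetD aux j 0 ∧ j ∉ was then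
        let was1 := PySem.Set.add was j
        let aux1 := PySem.List.pySetD aux j 0
        if 0 ≤ j - 1 ∧ (j - 1) ∉ was1 then
          runStackB (pvInc aux1 (j - 1)) was1 ((j - 1, true) :: (j, false) :: rest)
        else
          runStackB aux1 was1 ((j, false) :: rest)
      else runStackB aux was rest
    else
      if j + 1 < (aux.length : Int) ∧ (j + 1) ∉ was then
        runStackB (pvInc aux (j + 1)) was ((j + 1, true) :: rest)
      else runStackB aux was rest
termination_by 4 * pvUnlit aux.length was + 2 * stack.countP (fun f => !f.2) + stack.length
decreasing_by
  · have hlt := pvUnlit_add_lt aux.length was j hg.1 hg.2.1 hg.2.2.2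
    simp [pvInc_length, PySem.List.length_pySetD, *]
    rw [PySem.Set.add_of_not_mem hg.2.2.2] at hlt
    omega
  · have hlt := pvUnlit_add_lt aux.length was j hg.1 hg.2.1 hg.2.2.2
    simp [PySem.List.length_pySetD, *]
    rw [PySem.Set.add_of_not_mem hg.2.2.2] at hlt
    omega
  · simp [*]
  · simp [pvInc_length, *]
  · simp [*]
    omega

def light_bugs_alt (start : List Int) (time : Int) : List (List Int) :=
  ((PySem.List.pyRange 0 (time - 1) 1).foldl
    (fun (st : List (List Int) × List Int) _ =>
      let p := (List.range st.2.length).foldl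
        (fun (q : List Int × PySem.Set Int) (i : Nat) =>
          let aux := if (i : Int) ∉ q.2 then pvInc q.1 (i : Int) else q.1
          runStackB aux q.2 [((i : Int), true)])
        (st.2, PySem.Set.empty)
      (st.1 ++ [p.1], p.1))
    ([start], start)).1

-- ===== PRECONDITION & SPEC =====
def Spec_light_bugs (start : List Int) (time : Int) (out : List (List Int)) : Prop := out = light_bugs_alt start time
instance (start : List Int) (time : Int) (out : List (List Int)) : Decidable (Spec_light_bugs start time out) := by unfold Spec_light_bugs; infer_instance

-- ===== CLAIM (what is proved, stated in full; the proofs are below) =====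
def Claim_equal_light_bugs : Prop := ∀ (start : List Int) (time : Int), Dom_light_bugs start time → Spec_light_bugs start time (light_bugs start time)

-- ===== LEMMAS AND PROOFS =====

theorem pvUnlit_le (n : Nat) (was : List Int) : pvUnlit n was ≤ n := by
  have h := List.countP_le_length (l := List.range n) (p := fun k => decide ((Int.ofNat k) ∉ was))
  simpa [pvUnlit] using h

theorem pvGuard_bound (aux : List Int) (j : Int) (_h0 : 0 ≤ j)
    (h : 3 < PySem.List.pyGetD aux j 0) : j < (aux.length : Int) := by
  by_contra hge
  have hn : PySem.List.pyGet? aux j = none := by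
    rw [PySem.List.pyGet?_eq_none_iff]
    simp [PySem.Raise.InRange]
    omega
  simp [PySem.List.pyGetD, hn] at h

-- length preservation and monotonicity of the lighted set for A's cascade
theorem isLightA_inv : ∀ (f : Nat) (aux : List Int) (was : PySem.Set Int) (i : Int),
    (isLightA f aux was i).1.length = aux.length ∧
    pvUnlit aux.length (isLightA f aux was i).2 ≤ pvUnlit aux.length was := by
  intro f
  induction f with
  | zero => intro aux was i; simp [isLightA]
  | succ f ih =>
    intro aux was i
    simp only [isLightA]
    by_cases hg : 3 < PySem.List.pyGetD aux i 0 ∧ i ∉ was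
    · rw [if_pos hg]
      have key : ∀ (st2 : List Int × PySem.Set Int),
          st2.1.length = aux.length → pvUnlit aux.length st2.2 ≤ pvUnlit aux.length was →
          ((if i + 1 < (st2.1.length : Int) ∧ (i + 1) ∉ st2.2 then
              isLightA f (pvInc st2.1 (i + 1)) st2.2 (i + 1) else st2).1.length = aux.length ∧
           pvUnlit aux.length (if i + 1 < (st2.1.length : Int) ∧ (i + 1) ∉ st2.2 then
              isLightA f (pvInc st2.1 (i + 1)) st2.2 (i + 1) else st2).2 ≤ pvUnlit aux.length was) := by
        intro st2 hlen hun
        by_cases hr : i + 1 < (st2.1.length : Int) ∧ (i + 1) ∉ st2.2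
        · rw [if_pos hr]
          have h := ih (pvInc st2.1 (i + 1)) st2.2 (i + 1)
          rw [pvInc_length, hlen] at h
          exact ⟨h.1, le_trans h.2 hun⟩
        · rw [if_neg hr]; exact ⟨hlen, hun⟩
      by_cases hl : 0 ≤ i - 1 ∧ (i - 1) ∉ PySem.Set.add was i
      · rw [if_pos hl]
        have h := ih (pvInc (PySem.List.pySetD aux i 0) (i - 1)) (PySem.Set.add was i) (i - 1)
        rw [pvInc_length, PySem.List.length_pySetD] at h
        exact key _ h.1 (le_trans h.2 (pvUnlit_add_le _ _ _))
      · rw [if_neg hl]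
        exact key _ (by simp [PySem.List.length_pySetD]) (pvUnlit_add_le _ _ _)
    · rw [if_neg hg]; exact ⟨rfl, le_refl _⟩

-- the stack machine simulates the recursion (deferred right-branch included)
theorem sim : ∀ (N : Nat) (aux : List Int) (was : PySem.Set Int) (j : Int)
    (rest : List (Int × Bool)) (f : Nat),
    pvUnlit aux.length was ≤ N → 0 ≤ j → pvUnlit aux.length was < f →
    runStackB aux was ((j, true) :: rest) =
      runStackB (isLightA f aux was j).1 (isLightA f aux was j).2 rest := by
  intro N
  induction N with
  | zero =>
    intro aux was j rest f hN hj hf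
    -- no unlit cell: the guard cannot fire on either side
    cases f with
    | zero => omega
    | succ f' =>
      by_cases hG : 3 < PySem.List.pyGetD aux j 0 ∧ j ∉ was
      · exfalso
        have := pvUnlit_add_lt aux.length was j hj (pvGuard_bound aux j hj hG.1) hG.2
        omega
      · simp only [isLightA]
        rw [runStackB, if_pos rfl, dif_neg (fun h => hG ⟨h.2.2.1, h.2.2.2⟩), if_neg hG]
  | succ N ih =>
    intro aux was j rest f hN hj hf
    cases f with
    | zero => omega
    | succ f' =>
      by_cases hG : 3 < PySem.List.pyGetD aux j 0 ∧ j ∉ was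
      · have hjlen : j < (aux.length : Int) := pvGuard_bound aux j hj hG.1
        have hGB : 0 ≤ j ∧ j < (aux.length : Int) ∧ 3 < PySem.List.pyGetD aux j 0 ∧ j ∉ was :=
          ⟨hj, hjlen, hG.1, hG.2⟩
        have hlt := pvUnlit_add_lt aux.length was j hj hjlen hG.2
        set was1 := PySem.Set.add was j with hwas1
        set aux1 := PySem.List.pySetD aux j 0 with haux1
        have hlen1 : aux1.length = aux.length := by simp [haux1, PySem.List.length_pySetD]
        set st2 := (if 0 ≤ j - 1 ∧ (j - 1) ∉ was1 then
            isLightA f' (pvInc aux1 (j - 1)) was1 (j - 1) else (aux1, was1)) with hst2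
        have hst2len : st2.1.length = aux.length := by
          rw [hst2]; split
          · have h := isLightA_inv f' (pvInc aux1 (j - 1)) was1 (j - 1)
            rw [pvInc_length, hlen1] at h; exact h.1
          · exact hlen1
        have hst2un : pvUnlit aux.length st2.2 ≤ pvUnlit aux.length was1 := by
          rw [hst2]; split
          · have h := (isLightA_inv f' (pvInc aux1 (j - 1)) was1 (j - 1)).2
            rw [pvInc_length, hlen1] at h; exact h
          · exact le_refl _
        -- A's one-step unfolding
        have hA : isLightA (f' + 1) aux was j =
            (if j + 1 < (st2.1.length : Int) ∧ (j + 1) ∉ st2.2 then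
              isLightA f' (pvInc st2.1 (j + 1)) st2.2 (j + 1) else st2) := by
          simp only [isLightA]
          rw [if_pos hG, ← hwas1, ← haux1, ← hst2]
        -- B reaches the deferred right frame with state st2
        have hB : runStackB aux was ((j, true) :: rest) =
            runStackB st2.1 st2.2 ((j, false) :: rest) := by
          rw [runStackB]
          simp only [if_true]
          rw [dif_pos hGB]
          by_cases hl : 0 ≤ j - 1 ∧ (j - 1) ∉ was1
          · rw [if_pos hl]
            have hrec := ih (pvInc aux1 (j - 1)) was1 (j - 1) ((j, false) :: rest) f'
              (by rw [pvInc_length, hlen1]; omega)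
              (by omega)
              (by rw [pvInc_length, hlen1]; omega)
            rw [hrec, hst2, if_pos hl]
          · rw [if_neg hl, hst2, if_neg hl]
        -- process the right frame
        have hR : runStackB st2.1 st2.2 ((j, false) :: rest) =
            runStackB (isLightA (f' + 1) aux was j).1 (isLightA (f' + 1) aux was j).2 rest := by
          rw [hA, runStackB]
          simp only [Bool.false_eq_true, if_false]
          by_cases hr : j + 1 < (st2.1.length : Int) ∧ (j + 1) ∉ st2.2
          · rw [if_pos hr]
            have hrec := ih (pvInc st2.1 (j + 1)) st2.2 (j + 1) rest f'
              (by rw [pvInc_length, hst2len]; omega)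
              (by omega)
              (by rw [pvInc_length, hst2len]; omega)
            rw [hrec, if_pos hr]
          · rw [if_neg hr, if_neg hr]
        rw [hB, hR]
      · simp only [isLightA]
        rw [runStackB, if_pos rfl, dif_neg (fun h => hG ⟨h.2.2.1, h.2.2.2⟩), if_neg hG]

-- proof-side abbreviations for the shared per-step sweep
def pvBodyA (st : List Int × PySem.Set Int) (i : Nat) : List Int × PySem.Set Int :=
  let aux := if (i : Int) ∉ st.2 then pvInc st.1 (i : Int) else st.1
  isLightA (aux.length + 1) aux st.2 (i : Int)

def pvStep (aux0 : List Int) : List Int × PySem.Set Int :=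
  (List.range aux0.length).foldl pvBodyA (aux0, PySem.Set.empty)

theorem body_eq (st : List Int × PySem.Set Int) (i : Nat) :
    (fun (q : List Int × PySem.Set Int) (i : Nat) =>
      let aux := if (i : Int) ∉ q.2 then pvInc q.1 (i : Int) else q.1
      runStackB aux q.2 [((i : Int), true)]) st i = pvBodyA st i := by
  show runStackB (if (i : Int) ∉ st.2 then pvInc st.1 (i : Int) else st.1) st.2 [((i : Int), true)]
      = pvBodyA st i
  set aux := if (i : Int) ∉ st.2 then pvInc st.1 (i : Int) else st.1 with haux
  have hle := pvUnlit_le aux.length st.2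
  have h := sim (pvUnlit aux.length st.2) aux st.2 (i : Int) [] (aux.length + 1)
    (le_refl _) (by omega) (by omega)
  rw [h, runStackB, pvBodyA]

def pvFoldA (start : List Int) (b : Int) : List (List Int) :=
  (PySem.List.pyRange 0 b 1).foldl
    (fun result j => result ++ [(pvStep (PySem.List.pyGetD result j [])).1]) [start]

def pvFoldB (start : List Int) (b : Int) : List (List Int) × List Int :=
  (PySem.List.pyRange 0 b 1).foldl
    (fun st _ => (st.1 ++ [(pvStep st.2).1], (pvStep st.2).1)) ([start], start)

theorem outer (start : List Int) (n : Nat) :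
    pvFoldA start (n : Int) = (pvFoldB start (n : Int)).1 ∧
    (pvFoldB start (n : Int)).1.length = n + 1 ∧
    PySem.List.pyGetD (pvFoldB start (n : Int)).1 (n : Int) [] = (pvFoldB start (n : Int)).2 := by
  induction n with
  | zero =>
    simp [pvFoldA, pvFoldB, PySem.List.pyRange_one_eq_nil, PySem.List.pyGetD_zero_cons]
  | succ n ih =>
    obtain ⟨hAB, hlen, hget⟩ := ih
    have hsr : PySem.List.pyRange 0 ((n : Int) + 1) 1 =
        PySem.List.pyRange 0 (n : Int) 1 ++ [(n : Int)] :=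
      PySem.List.pyRange_one_succ_right (by omega)
    have hcast : ((n + 1 : Nat) : Int) = (n : Int) + 1 := by push_cast; ring
    rw [pvFoldA, pvFoldB, hcast, hsr, List.foldl_append, List.foldl_append]
    simp only [List.foldl_cons, List.foldl_nil]
    rw [← pvFoldA, ← pvFoldB, hAB, hget]
    refine ⟨rfl, ?_, ?_⟩
    · simp [hlen]
    · have : ((n + 1 : Nat) : Int) = (((pvFoldB start (n : Int)).1).length : Int) := by
        rw [hlen]
      rw [hcast] at this
      rw [this, PySem.List.pyGetD_natCast]
      simp [List.getD]

-- ===== VERDICT (by name: the statement is the Claim_ definition above) =====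
theorem light_bugs_spec : Claim_equal_light_bugs := by
  intro start time _
  show light_bugs start time = light_bugs_alt start time
  have hA : light_bugs start time = pvFoldA start (time - 1) := by
    unfold light_bugs pvFoldA pvStep pvBodyA
    rfl
  have hB : light_bugs_alt start time = (pvFoldB start (time - 1)).1 := by
    show ((PySem.List.pyRange 0 (time - 1) 1).foldl
      (fun (st : List (List Int) × List Int) _ =>
        let p := (List.range st.2.length).foldl
          (fun (q : List Int × PySem.Set Int) (i : Nat) =>
            let aux := if (i : Int) ∉ q.2 then pvInc q.1 (i : Int) else q.1
            runStackB aux q.2 [((i : Int), true)])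
          (st.2, PySem.Set.empty)
        (st.1 ++ [p.1], p.1))
      ([start], start)).1 = (pvFoldB start (time - 1)).1
    have hfun : (fun (q : List Int × PySem.Set Int) (i : Nat) =>
        let aux := if (i : Int) ∉ q.2 then pvInc q.1 (i : Int) else q.1
        runStackB aux q.2 [((i : Int), true)]) = pvBodyA := funext fun q => funext fun i => body_eq q i
    rw [hfun]
    rfl
  rw [hA, hB]
  by_cases hle : time - 1 ≤ 0
  · rw [pvFoldA, pvFoldB, PySem.List.pyRange_one_eq_nil hle]
    rfl
  · obtain ⟨n, hn⟩ : ∃ n : Nat, time - 1 = (n : Int) := ⟨(time - 1).toNat, by omega⟩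
    rw [hn]
    exact (outer start n).1
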